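-- pv_equiv track=rewrite | github.com/rmb122/data-structure | 结课作业/abondon.py | smoothifyGray
-- ===== SOURCE A (Python) =====
-- def smoothifyGray(piexls):
--     newPiexls = list()
--     gaussTemplate = [1, 2, 1, 2, 4, 2, 1, 2, 1]
--     overfolw = lambda x: x if x <= 255 else 255
--     for x in range(1, len(piexls) - 1):
--         temp = list()
--         for y in range(1, len(piexls[x]) - 1):
--             grayscale = 0
--             curr = 0
--             for xShift in range(-1, 2):
--                 for yShift in range(-1, 2):
--                     grayscale += (piexls[x + xShift][y + yShift] * gaussTemplate[curr])
--                     curr += 1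
--             grayscale = overfolw(grayscale // 16)
--             temp.append(grayscale)
--         newPiexls.append(temp)
--     return newPiexls
-- ===== SOURCE B (Python) =====
-- def smoothifyGray(piexls):
--     overfolw = lambda s: s if s <= 255 else 255
--     hs = [[row[j] + 2 * row[j + 1] + row[j + 2] for j in range(len(row) - 2)]
--           for row in piexls]
--     return [[overfolw((hs[i][j] + 2 * hs[i + 1][j] + hs[i + 2][j]) // 16)
--              for j in range(len(piexls[i + 1]) - 2)]
--             for i in range(len(piexls) - 2)]
-- ===== Notes on version B (the rewrite author's own statement) =====
-- stated objective: faster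
-- what changed: B exploits separability of the 3x3 Gaussian kernel: one pass of horizontal 1-2-1 sums per row, then one vertical 1-2-1 combination with the single final //16, instead of A's 9-term kernel loop per pixel.
import Mathlib
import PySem

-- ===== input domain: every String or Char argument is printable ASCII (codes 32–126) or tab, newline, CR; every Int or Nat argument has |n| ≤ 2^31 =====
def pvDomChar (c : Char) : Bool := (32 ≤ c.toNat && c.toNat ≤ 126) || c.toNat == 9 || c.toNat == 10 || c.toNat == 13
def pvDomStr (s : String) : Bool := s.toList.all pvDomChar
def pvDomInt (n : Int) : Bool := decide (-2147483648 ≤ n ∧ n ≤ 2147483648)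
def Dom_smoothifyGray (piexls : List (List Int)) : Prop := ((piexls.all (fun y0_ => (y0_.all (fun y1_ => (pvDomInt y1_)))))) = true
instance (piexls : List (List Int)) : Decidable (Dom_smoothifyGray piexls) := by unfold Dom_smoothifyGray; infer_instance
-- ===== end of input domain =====

-- B replaces A's per-pixel 9-term kernel loop by a separable two-pass blur (horizontal
-- 1-2-1 sums once per row, then one vertical 1-2-1 combination with the single final //16);
-- objective: faster (fewer multiplications/lookups per pixel), bitwise-identical output.

-- ===== PORT A =====
def pvOverfolw (x : Int) : Int := if x ≤ 255 then x else 255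

def pvGaussTemplate : List Int := [1, 2, 1, 2, 4, 2, 1, 2, 1]

def smoothifyGray (piexls : List (List Int)) : List (List Int) :=
  (PySem.List.pyRange 1 ((piexls.length : Int) - 1) 1).foldl (fun newPiexls x =>
    newPiexls ++ [
      (PySem.List.pyRange 1 (((PySem.List.pyGetD piexls x []).length : Int) - 1) 1).foldl
        (fun temp y =>
          let acc :=
            (PySem.List.pyRange (-1) 2 1).foldl (fun (acc : Int × Int) xShift =>
              (PySem.List.pyRange (-1) 2 1).foldl (fun (acc : Int × Int) yShift =>
                (acc.1 + PySem.List.pyGetD (PySem.List.pyGetD piexls (x + xShift) []) (y + yShift) 0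
                       * PySem.List.pyGetD pvGaussTemplate acc.2 0,
                 acc.2 + 1)) acc) ((0 : Int), (0 : Int))
          temp ++ [pvOverfolw (PySem.Int.floordiv acc.1 16)]) []]) []

-- ===== PORT B =====
def pvHRow (row : List Int) : List Int :=
  (List.range (row.length - 2)).map (fun j =>
    row.getD j 0 + 2 * row.getD (j + 1) 0 + row.getD (j + 2) 0)

def smoothifyGray_alt (piexls : List (List Int)) : List (List Int) :=
  let hs := piexls.map pvHRow
  (List.range (piexls.length - 2)).map (fun i =>
    (List.range ((piexls.getD (i + 1) []).length - 2)).map (fun j =>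
      pvOverfolw (PySem.Int.floordiv
        ((hs.getD i []).getD j 0 + 2 * (hs.getD (i + 1) []).getD j 0
           + (hs.getD (i + 2) []).getD j 0) 16)))

-- ===== PRECONDITION & SPEC =====
-- Pre_ excludes exactly the ragged inputs on which A raises IndexError: an interior row of
-- length ≥ 3 whose upper or lower neighbour row is shorter than it.
def Pre_smoothifyGray (piexls : List (List Int)) : Prop :=
  ∀ i < piexls.length, i + 3 ≤ piexls.length →
    3 ≤ (piexls.getD (i + 1) []).length →
    (piexls.getD (i + 1) []).length ≤ (piexls.getD i []).length ∧
    (piexls.getD (i + 1) []).length ≤ (piexls.getD (i + 2) []).length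
instance (piexls : List (List Int)) : Decidable (Pre_smoothifyGray piexls) := by
  unfold Pre_smoothifyGray; infer_instance

def pvWitness_smoothifyGray : List (List Int) := [[1, 2, 3], [4, 5, 6], [7, 8, 9]]

def Spec_smoothifyGray (piexls : List (List Int)) (out : List (List Int)) : Prop := out = smoothifyGray_alt piexls
instance (piexls : List (List Int)) (out : List (List Int)) : Decidable (Spec_smoothifyGray piexls out) := by unfold Spec_smoothifyGray; infer_instance

-- ===== CLAIM (what is proved, stated in full; the proofs are below) =====
def Claim_equal_smoothifyGray : Prop := ∀ (piexls : List (List Int)), Dom_smoothifyGray piexls → Pre_smoothifyGray piexls → Spec_smoothifyGray piexls (smoothifyGray piexls)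

-- ===== LEMMAS AND PROOFS =====

-- abbreviation for A's double indexing, proofs only
def pvG (p : List (List Int)) (a b : Int) : Int :=
  PySem.List.pyGetD (PySem.List.pyGetD p a []) b 0

lemma pv_nineSum (p : List (List Int)) (x y : Int) :
    ((PySem.List.pyRange (-1) 2 1).foldl (fun (acc : Int × Int) xShift =>
      (PySem.List.pyRange (-1) 2 1).foldl (fun (acc : Int × Int) yShift =>
        (acc.1 + PySem.List.pyGetD (PySem.List.pyGetD p (x + xShift) []) (y + yShift) 0
               * PySem.List.pyGetD pvGaussTemplate acc.2 0,
         acc.2 + 1)) acc) ((0 : Int), (0 : Int))).1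
    = (pvG p (x - 1) (y - 1) + 2 * pvG p (x - 1) y + pvG p (x - 1) (y + 1))
    + 2 * (pvG p x (y - 1) + 2 * pvG p x y + pvG p x (y + 1))
    + (pvG p (x + 1) (y - 1) + 2 * pvG p (x + 1) y + pvG p (x + 1) (y + 1)) := by
  have h3 : PySem.List.pyRange (-1) 2 1 = [-1, 0, 1] := by decide
  have g0 : PySem.List.pyGetD pvGaussTemplate 0 0 = 1 := by decide
  have g1 : PySem.List.pyGetD pvGaussTemplate 1 0 = 2 := by decide
  have g2 : PySem.List.pyGetD pvGaussTemplate 2 0 = 1 := by decide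
  have g3 : PySem.List.pyGetD pvGaussTemplate 3 0 = 2 := by decide
  have g4 : PySem.List.pyGetD pvGaussTemplate 4 0 = 4 := by decide
  have g5 : PySem.List.pyGetD pvGaussTemplate 5 0 = 2 := by decide
  have g6 : PySem.List.pyGetD pvGaussTemplate 6 0 = 1 := by decide
  have g7 : PySem.List.pyGetD pvGaussTemplate 7 0 = 2 := by decide
  have g8 : PySem.List.pyGetD pvGaussTemplate 8 0 = 1 := by decide
  simp only [h3, List.foldl]
  norm_num [pvG, g0, g1, g2, g3, g4, g5, g6, g7, g8]
  ring_nf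

lemma pv_hrow_getD (row : List Int) (j : Nat) (hj : j + 3 ≤ row.length) :
    (pvHRow row).getD j 0 = row.getD j 0 + 2 * row.getD (j + 1) 0 + row.getD (j + 2) 0 := by
  unfold pvHRow
  exact PySem.List.getD_map_range _ _ _ _ (by omega)

theorem smoothifyGray_eq (p : List (List Int)) (hpre : Pre_smoothifyGray p) :
    smoothifyGray p = smoothifyGray_alt p := by
  unfold smoothifyGray smoothifyGray_alt
  simp only [PySem.List.foldl_append_singleton_eq_map, List.nil_append]
  have ht : ((p.length : Int) - 1 - 1).toNat = p.length - 2 := by omega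
  rw [show PySem.List.pyRange 1 ((p.length : Int) - 1) 1
        = (List.range (p.length - 2)).map (fun k : Nat => (1 : Int) + (k : Int)) from by
      rw [PySem.List.pyRange_one, ht], List.map_map]
  apply List.map_congr_left
  intro i hi
  rw [List.mem_range] at hi
  have hip : i + 1 < p.length := by omega
  simp only [Function.comp_apply]
  have hx : PySem.List.pyGetD p ((1 : Int) + (i : Int)) [] = p.getD (i + 1) [] := by
    have h : (1 : Int) + (i : Int) = ((i + 1 : Nat) : Int) := by omega
    rw [h, PySem.List.pyGetD_natCast]
  rw [hx]
  have ht2 : (((p.getD (i + 1) []).length : Int) - 1 - 1).toNat = (p.getD (i + 1) []).length - 2 := by omega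
  rw [show PySem.List.pyRange 1 (((p.getD (i + 1) []).length : Int) - 1) 1
        = (List.range ((p.getD (i + 1) []).length - 2)).map (fun k : Nat => (1 : Int) + (k : Int)) from by
      rw [PySem.List.pyRange_one, ht2], List.map_map]
  apply List.map_congr_left
  intro j hj
  rw [List.mem_range] at hj
  have hj3 : j + 3 <= (p.getD (i + 1) []).length := by omega
  obtain ⟨hup, hdn⟩ := hpre i (by omega) (by omega) (by omega)
  simp only [Function.comp_apply]
  rw [pv_nineSum]
  have harg : ∀ (a b : Nat), pvG p ((a : Int)) ((b : Int)) = (p.getD a []).getD b 0 := by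
    intro a b
    simp [pvG, PySem.List.pyGetD_natCast]
  have e1 : pvG p ((1 : Int) + (i : Int) - 1) ((1 : Int) + (j : Int) - 1) = (p.getD i []).getD j 0 := by
    have h1 : (1 : Int) + (i : Int) - 1 = ((i : Nat) : Int) := by omega
    have h2 : (1 : Int) + (j : Int) - 1 = ((j : Nat) : Int) := by omega
    rw [h1, h2, harg]
  have e2 : pvG p ((1 : Int) + (i : Int) - 1) ((1 : Int) + (j : Int)) = (p.getD i []).getD (j + 1) 0 := by
    have h1 : (1 : Int) + (i : Int) - 1 = ((i : Nat) : Int) := by omega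
    have h2 : (1 : Int) + (j : Int) = ((j + 1 : Nat) : Int) := by omega
    rw [h1, h2, harg]
  have e3 : pvG p ((1 : Int) + (i : Int) - 1) ((1 : Int) + (j : Int) + 1) = (p.getD i []).getD (j + 2) 0 := by
    have h1 : (1 : Int) + (i : Int) - 1 = ((i : Nat) : Int) := by omega
    have h2 : (1 : Int) + (j : Int) + 1 = ((j + 2 : Nat) : Int) := by omega
    rw [h1, h2, harg]
  have e4 : pvG p ((1 : Int) + (i : Int)) ((1 : Int) + (j : Int) - 1) = (p.getD (i + 1) []).getD j 0 := by
    have h1 : (1 : Int) + (i : Int) = ((i + 1 : Nat) : Int) := by omega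
    have h2 : (1 : Int) + (j : Int) - 1 = ((j : Nat) : Int) := by omega
    rw [h1, h2, harg]
  have e5 : pvG p ((1 : Int) + (i : Int)) ((1 : Int) + (j : Int)) = (p.getD (i + 1) []).getD (j + 1) 0 := by
    have h1 : (1 : Int) + (i : Int) = ((i + 1 : Nat) : Int) := by omega
    have h2 : (1 : Int) + (j : Int) = ((j + 1 : Nat) : Int) := by omega
    rw [h1, h2, harg]
  have e6 : pvG p ((1 : Int) + (i : Int)) ((1 : Int) + (j : Int) + 1) = (p.getD (i + 1) []).getD (j + 2) 0 := by
    have h1 : (1 : Int) + (i : Int) = ((i + 1 : Nat) : Int) := by omega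
    have h2 : (1 : Int) + (j : Int) + 1 = ((j + 2 : Nat) : Int) := by omega
    rw [h1, h2, harg]
  have e7 : pvG p ((1 : Int) + (i : Int) + 1) ((1 : Int) + (j : Int) - 1) = (p.getD (i + 2) []).getD j 0 := by
    have h1 : (1 : Int) + (i : Int) + 1 = ((i + 2 : Nat) : Int) := by omega
    have h2 : (1 : Int) + (j : Int) - 1 = ((j : Nat) : Int) := by omega
    rw [h1, h2, harg]
  have e8 : pvG p ((1 : Int) + (i : Int) + 1) ((1 : Int) + (j : Int)) = (p.getD (i + 2) []).getD (j + 1) 0 := by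
    have h1 : (1 : Int) + (i : Int) + 1 = ((i + 2 : Nat) : Int) := by omega
    have h2 : (1 : Int) + (j : Int) = ((j + 1 : Nat) : Int) := by omega
    rw [h1, h2, harg]
  have e9 : pvG p ((1 : Int) + (i : Int) + 1) ((1 : Int) + (j : Int) + 1) = (p.getD (i + 2) []).getD (j + 2) 0 := by
    have h1 : (1 : Int) + (i : Int) + 1 = ((i + 2 : Nat) : Int) := by omega
    have h2 : (1 : Int) + (j : Int) + 1 = ((j + 2 : Nat) : Int) := by omega
    rw [h1, h2, harg]
  rw [e1, e2, e3, e4, e5, e6, e7, e8, e9]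
  -- B side: unfold hs lookups
  have hmap : ∀ (k : Nat), k < p.length -> (p.map pvHRow).getD k [] = pvHRow (p.getD k []) := by
    intro k hk
    rw [List.getD_eq_getElem _ _ (by simpa using hk), List.getElem_map, List.getD_eq_getElem _ _ hk]
  rw [hmap i (by omega), hmap (i + 1) (by omega), hmap (i + 2) (by omega)]
  rw [pv_hrow_getD _ _ (by omega), pv_hrow_getD _ _ (by omega), pv_hrow_getD _ _ (by omega)]

-- ===== VERDICT (by name: the statement is the Claim_ definition above) =====
theorem smoothifyGray_spec : Claim_equal_smoothifyGray := by
  intro p _ hpre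
  unfold Spec_smoothifyGray
  exact smoothifyGray_eq p hpre
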